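-- pv_equiv track=rewrite | github.com/TaoufikElkadi/nlp-rag | retry_rate_limited.py | get_oracle_docs
-- ===== SOURCE A (Python) =====
-- def get_oracle_docs(questions_map, corpus):
--     """Extract oracle document IDs by matching titles"""
--     title_to_doc = {}
--     for doc_id, doc in corpus.items():
--         title = doc.get('title', '').strip()
--         if title:
--             if title not in title_to_doc:
--                 title_to_doc[title] = []
--             title_to_doc[title].append(doc_id)
--
--     oracle_map = {}
--     for q_id, q_data in questions_map.items():
--         oracle_docs = set()
--         if 'context' in q_data:
--             for ctx in q_data['context']:
--                 title = ctx[0].strip() if isinstance(ctx, list) else str(ctx).strip()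
--                 if title in title_to_doc:
--                     oracle_docs.update(title_to_doc[title])
--                 else:
--                     # Case-insensitive match
--                     for t, ids in title_to_doc.items():
--                         if t.lower() == title.lower():
--                             oracle_docs.update(ids)
--                             break
--         oracle_map[q_id] = oracle_docs
--
--     return oracle_map
-- ===== SOURCE B (Python) =====
-- def get_oracle_docs(questions_map, corpus):
--     """Match context titles to corpus doc ids via a nested lowercase -> exact-title index"""
--     index = {}
--     for doc_id, doc in corpus.items():
--         title = doc.get('title', '').strip()
--         if title:
--             index.setdefault(title.lower(), {}).setdefault(title, []).append(doc_id)
--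
--     def resolve(ctx):
--         title = (ctx[0] if isinstance(ctx, list) else str(ctx)).strip()
--         group = index.get(title.lower())
--         if not group:
--             return []
--         if title in group:
--             return group[title]
--         return next(iter(group.values()))
--
--     oracle_map = {}
--     for q_id, q_data in questions_map.items():
--         oracle_map[q_id] = set(i for ctx in q_data.get('context', []) for i in resolve(ctx))
--     return oracle_map
-- ===== Notes on version B (the rewrite author's own statement) =====
-- stated objective: alternative
-- what changed: B builds one nested index (lowercase title -> exact title -> doc ids) in a single corpus pass and resolves each context title with two dict lookups (exact inside the group, else the group's first entry), replacing A's inner scan of all titles on every case-insensitive miss; per question B flattens the resolved id lists and builds the set once instead of updating it per context.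
import Mathlib
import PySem

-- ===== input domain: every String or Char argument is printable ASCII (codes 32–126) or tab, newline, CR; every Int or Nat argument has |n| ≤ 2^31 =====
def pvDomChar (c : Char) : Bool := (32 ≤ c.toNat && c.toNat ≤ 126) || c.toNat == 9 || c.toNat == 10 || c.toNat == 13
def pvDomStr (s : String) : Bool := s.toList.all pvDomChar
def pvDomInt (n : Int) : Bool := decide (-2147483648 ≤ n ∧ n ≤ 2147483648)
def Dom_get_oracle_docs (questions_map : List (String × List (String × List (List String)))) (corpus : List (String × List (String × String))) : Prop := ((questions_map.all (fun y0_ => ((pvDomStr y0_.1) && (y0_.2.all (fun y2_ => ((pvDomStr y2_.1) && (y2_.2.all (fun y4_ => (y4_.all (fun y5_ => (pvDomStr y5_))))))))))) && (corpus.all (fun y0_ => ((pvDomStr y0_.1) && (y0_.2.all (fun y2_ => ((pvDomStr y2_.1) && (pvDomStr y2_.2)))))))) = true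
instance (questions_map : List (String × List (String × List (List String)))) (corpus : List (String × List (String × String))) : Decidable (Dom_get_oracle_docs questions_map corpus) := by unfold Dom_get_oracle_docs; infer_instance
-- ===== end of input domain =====

-- B replaces A's per-miss rescan of all titles by a nested index built once (lowercase title -> exact title -> doc ids),
-- so each context title is resolved by two dict lookups instead of a scan of every title.

-- shared with both Pythons (identical source lines): doc.get('title','').strip()  and  ctx[0].strip()
def pvStripTitle (doc : List (String × String)) : String :=
  PySem.Str.strip ((PySem.Dict.mk doc).getD "title" "")

-- ctx[0]: Python raises IndexError on an empty ctx (excluded by Pre_); the `.getD ""` default is never reached there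
def pvCtxTitle (ctx : List String) : String :=
  PySem.Str.strip ((PySem.List.pyGet? ctx (0 : Int)).getD "")

-- ===== PORT A =====
-- first loop: title_to_doc[title] = [] if absent, then .append(doc_id)
def pvTitleIndex (corpus : List (String × List (String × String))) : PySem.Dict String (List String) :=
  corpus.foldl
    (fun d p =>
      let title := pvStripTitle p.2
      if title ≠ "" then (d.setdefault title []).modify title [] (fun xs => xs ++ [p.1]) else d)
    PySem.Dict.empty

def get_oracle_docs (questions_map : List (String × List (String × List (List String)))) (corpus : List (String × List (String × String))) : List (String × List String) :=
  let title_to_doc := pvTitleIndex corpus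
  (questions_map.foldl
    (fun om q =>
      let qd := PySem.Dict.mk q.2
      let docs : PySem.Set String :=
        if qd.contains "context" then
          (qd.getD "context" []).foldl
            (fun s ctx =>
              let title := pvCtxTitle ctx
              if title_to_doc.contains title then
                PySem.Set.update s (title_to_doc.getD title [])
              else
                -- for t, ids in title_to_doc.items(): if t.lower() == title.lower(): update; break
                match title_to_doc.items.find? (fun t => PySem.Str.lower t.1 == PySem.Str.lower title) with
                | some t => PySem.Set.update s t.2
                | none => s)
            PySem.Set.empty
        else PySem.Set.empty
      om.insert q.1 docs)
    (PySem.Dict.empty : PySem.Dict String (PySem.Set String))).items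

-- ===== PORT B =====
-- index.setdefault(title.lower(), {}).setdefault(title, []).append(doc_id)
def pvIndexNest (corpus : List (String × List (String × String))) : PySem.Dict String (PySem.Dict String (List String)) :=
  corpus.foldl
    (fun d p =>
      let title := pvStripTitle p.2
      if title ≠ "" then
        d.modify (PySem.Str.lower title) PySem.Dict.empty
          (fun g => g.modify title [] (fun xs => xs ++ [p.1]))
      else d)
    PySem.Dict.empty

-- def resolve(ctx): exact lookup inside the lowercase group, else the group's first entry
def pvResolve (index : PySem.Dict String (PySem.Dict String (List String))) (ctx : List String) : List String :=
  let title := pvCtxTitle ctx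
  match index.get? (PySem.Str.lower title) with
  | none => []
  | some group =>
    if group.items = [] then []                       -- `if not group` (empty dict is falsy)
    else if group.contains title then group.getD title []
    else ((group.items.head?).map (·.2)).getD []      -- next(iter(group.values())); guarded nonempty, the [] default is unreachable

def get_oracle_docs_alt (questions_map : List (String × List (String × List (List String)))) (corpus : List (String × List (String × String))) : List (String × List String) :=
  let index := pvIndexNest corpus
  (questions_map.foldl
    (fun om q =>
      om.insert q.1
        (PySem.Set.ofList (((PySem.Dict.mk q.2).getD "context" []).flatMap (pvResolve index))))
    (PySem.Dict.empty : PySem.Dict String (PySem.Set String))).items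

-- ===== PRECONDITION & SPEC =====
-- Pre_ excludes only inputs where Python A raises IndexError: a question whose 'context' list contains an empty inner list (ctx[0]).
def Pre_get_oracle_docs (questions_map : List (String × List (String × List (List String)))) (corpus : List (String × List (String × String))) : Prop :=
  ∀ q ∈ questions_map, ∀ ctx ∈ ((PySem.Dict.mk q.2).getD "context" []), ctx ≠ []
instance (questions_map : List (String × List (String × List (List String)))) (corpus : List (String × List (String × String))) : Decidable (Pre_get_oracle_docs questions_map corpus) := by unfold Pre_get_oracle_docs; infer_instance

def pvWitness_get_oracle_docs : (List (String × List (String × List (List String)))) × (List (String × List (String × String))) :=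
  ([("q1", [("context", [["T"], ["unknown"]])]), ("q2", [])],
   [("d1", [("title", " T ")]), ("d2", [("title", "t")]), ("d3", [])])

def Spec_get_oracle_docs (questions_map : List (String × List (String × List (List String)))) (corpus : List (String × List (String × String))) (out : List (String × List String)) : Prop := out = get_oracle_docs_alt questions_map corpus
instance (questions_map : List (String × List (String × List (List String)))) (corpus : List (String × List (String × String))) (out : List (String × List String)) : Decidable (Spec_get_oracle_docs questions_map corpus out) := by unfold Spec_get_oracle_docs; infer_instance

-- ===== CLAIM (what is proved, stated in full; the proofs are below) =====
def Claim_equal_get_oracle_docs : Prop := ∀ (questions_map : List (String × List (String × List (List String)))) (corpus : List (String × List (String × String))), Dom_get_oracle_docs questions_map corpus → Pre_get_oracle_docs questions_map corpus → Spec_get_oracle_docs questions_map corpus (get_oracle_docs questions_map corpus)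

-- ===== LEMMAS AND PROOFS =====

def pvGroupOf (l : List (String × List String)) (low : String) : List (String × List String) :=
  l.filter (fun q => PySem.Str.lower q.1 == low)

theorem pv_group_lookup (t2d : PySem.Dict String (List String)) (g : PySem.Dict String (List String)) (t : String)
    (hnd : t2d.keys.Nodup) (hg : g.items = pvGroupOf t2d.items (PySem.Str.lower t)) :
    g.contains t = t2d.contains t ∧ g.getD t [] = t2d.getD t [] := by
  have hgnd : g.keys.Nodup := by
    have : g.keys = (pvGroupOf t2d.items (PySem.Str.lower t)).map (·.1) := by
      simp only [PySem.Dict.keys, hg]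
    rw [this]
    exact List.Nodup.sublist (List.Sublist.map _ List.filter_sublist) hnd
  have hmem : (t ∈ g.keys) ↔ t ∈ t2d.keys := by
    simp only [PySem.Dict.keys, hg, pvGroupOf, List.mem_map, List.mem_filter]
    constructor
    · rintro ⟨q, ⟨hq, _⟩, hq1⟩; exact ⟨q, hq, hq1⟩
    · rintro ⟨q, hq, hq1⟩; exact ⟨q, ⟨hq, by rw [hq1]; exact beq_self_eq_true _⟩, hq1⟩
  constructor
  · rw [PySem.Dict.contains_eq_decide_mem_keys, PySem.Dict.contains_eq_decide_mem_keys]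
    exact decide_eq_decide.mpr hmem
  · cases hgt : t2d.get? t with
    | none =>
      have htm : t ∉ t2d.keys := (PySem.Dict.get?_eq_none_iff_not_mem_keys _ _).mp hgt
      have : g.get? t = none := (PySem.Dict.get?_eq_none_iff_not_mem_keys _ _).mpr (fun hm => htm (hmem.mp hm))
      rw [PySem.Dict.getD_of_get?_eq_none _ _ hgt, PySem.Dict.getD_of_get?_eq_none _ _ this]
    | some v =>
      have hmemi : (t, v) ∈ g.items := by
        rw [hg]
        exact List.mem_filter.mpr ⟨PySem.Dict.mem_items_of_get?_eq_some _ hgt, by simp⟩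
      rw [PySem.Dict.getD_of_get?_eq_some _ _ hgt,
          PySem.Dict.getD_of_get?_eq_some _ _ (PySem.Dict.get?_of_mem_items _ hmemi hgnd)]

theorem pv_filter_map_replace (l : List (String × List String)) (t : String) (v : List String) (low : String)
    (h : PySem.Str.lower t ≠ low) :
    pvGroupOf (l.map (fun q => if q.1 == t then (t, v) else q)) low = pvGroupOf l low := by
  unfold pvGroupOf
  induction l with
  | nil => rfl
  | cons q l ih =>
    obtain ⟨k, w⟩ := q
    simp only [List.map_cons, List.filter_cons]
    by_cases hq : k = t
    · subst hq
      simp only [beq_self_eq_true, if_true]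
      have hf : (PySem.Str.lower k == low) = false := beq_eq_false_iff_ne.mpr h
      simp only [hf, Bool.false_eq_true, if_false]
      simpa using ih
    · have hne : ((k, w).1 == t) = false := beq_eq_false_iff_ne.mpr hq
      simp only [hne, Bool.false_eq_true, if_false]
      by_cases hp : PySem.Str.lower k = low
      · simp only [beq_iff_eq.mpr hp, if_true]
        rw [List.cons_inj_right]
        simpa using ih
      · simp only [beq_eq_false_iff_ne.mpr hp, Bool.false_eq_true, if_false]
        simpa using ih

theorem pv_group_insert_same (t2d g0 : PySem.Dict String (List String)) (t : String) (v : List String)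
    (hnd : t2d.keys.Nodup) (hg0 : g0.items = pvGroupOf t2d.items (PySem.Str.lower t)) :
    (g0.insert t v).items = pvGroupOf (t2d.insert t v).items (PySem.Str.lower t) := by
  obtain ⟨hcontEq, _⟩ := pv_group_lookup t2d g0 t hnd hg0
  by_cases hct : t2d.contains t
  · rw [PySem.Dict.items_insert_of_contains _ _ hct,
        PySem.Dict.items_insert_of_contains _ _ (hcontEq.trans hct), hg0]
    unfold pvGroupOf
    rw [List.filter_map]
    refine congrArg (List.map _) (List.filter_congr ?_).symm
    intro q _
    by_cases hqt : q.1 = t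
    · simp [Function.comp, hqt]
    · simp [Function.comp, beq_eq_false_iff_ne.mpr hqt]
  · rw [PySem.Dict.items_insert_of_not_contains _ _ (Bool.eq_false_iff.mpr hct),
        PySem.Dict.items_insert_of_not_contains _ _ (by rw [hcontEq]; exact Bool.eq_false_iff.mpr hct), hg0]
    unfold pvGroupOf
    rw [List.filter_append]
    simp

theorem pv_group_insert_other (t2d : PySem.Dict String (List String)) (t : String) (v : List String) (low : String)
    (h : PySem.Str.lower t ≠ low) :
    pvGroupOf (t2d.insert t v).items low = pvGroupOf t2d.items low := by
  by_cases hct : t2d.contains t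
  · rw [PySem.Dict.items_insert_of_contains _ _ hct]
    exact pv_filter_map_replace _ _ _ _ h
  · rw [PySem.Dict.items_insert_of_not_contains _ _ (Bool.eq_false_iff.mpr hct)]
    unfold pvGroupOf
    rw [List.filter_append]
    simp [beq_eq_false_iff_ne.mpr h]

theorem pv_flat_step (d : PySem.Dict String (List String)) (t : String) (x : String) :
    d.modify t [] (fun xs => xs ++ [x]) = d.insert t (d.getD t [] ++ [x]) := rfl

theorem pv_nest_step (idx : PySem.Dict String (PySem.Dict String (List String))) (t : String) (x : String) :
    idx.modify (PySem.Str.lower t) PySem.Dict.empty (fun g => g.modify t [] (fun xs => xs ++ [x]))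
    = idx.insert (PySem.Str.lower t)
        ((idx.getD (PySem.Str.lower t) PySem.Dict.empty).insert t
          ((idx.getD (PySem.Str.lower t) PySem.Dict.empty).getD t [] ++ [x])) := rfl

theorem pv_keys_nodup_insert (d : PySem.Dict String (List String)) (t : String) (v : List String)
    (hnd : d.keys.Nodup) : (d.insert t v).keys.Nodup := by
  by_cases hct : d.contains t
  · rw [PySem.Dict.keys_insert_of_contains _ _ hct]; exact hnd
  · rw [PySem.Dict.keys_insert_of_not_contains _ _ (Bool.eq_false_iff.mpr hct)]
    have ht : t ∉ d.keys := fun hm => hct ((PySem.Dict.contains_iff_mem_keys _ _).mpr hm)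
    rw [List.nodup_append]
    refine ⟨hnd, List.nodup_singleton t, ?_⟩
    intro a ha b hb
    rw [List.mem_singleton] at hb
    subst hb
    exact fun h => ht (h ▸ ha)

theorem pv_getD_group (idx : PySem.Dict String (PySem.Dict String (List String)))
    (t2d : PySem.Dict String (List String)) (low : String)
    (hinv : (match idx.get? low with | some g => g.items | none => []) = pvGroupOf t2d.items low) :
    (idx.getD low PySem.Dict.empty).items = pvGroupOf t2d.items low := by
  cases hg : idx.get? low with
  | none => rw [hg] at hinv; rw [PySem.Dict.getD_of_get?_eq_none _ _ hg]; exact hinv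
  | some g => rw [hg] at hinv; rw [PySem.Dict.getD_of_get?_eq_some _ _ hg]; exact hinv

set_option maxHeartbeats 1000000 in
theorem pv_inv (corpus : List (String × List (String × String)))
    (t2d : PySem.Dict String (List String)) (idx : PySem.Dict String (PySem.Dict String (List String)))
    (hnd : t2d.keys.Nodup)
    (hinv : ∀ low, (match idx.get? low with | some g => g.items | none => []) = pvGroupOf t2d.items low) :
    (corpus.foldl
      (fun d p =>
        let title := pvStripTitle p.2
        if title ≠ "" then d.modify title [] (fun xs => xs ++ [p.1]) else d) t2d).keys.Nodup ∧
    (∀ low,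
      (match (corpus.foldl
        (fun d p =>
          let title := pvStripTitle p.2
          if title ≠ "" then
            d.modify (PySem.Str.lower title) PySem.Dict.empty
              (fun g => g.modify title [] (fun xs => xs ++ [p.1]))
          else d) idx).get? low with
       | some g => g.items
       | none => []) =
      pvGroupOf (corpus.foldl
        (fun d p =>
          let title := pvStripTitle p.2
          if title ≠ "" then d.modify title [] (fun xs => xs ++ [p.1]) else d) t2d).items low) := by
  induction corpus generalizing t2d idx with
  | nil => exact ⟨hnd, hinv⟩
  | cons p corpus ih =>
    simp only [List.foldl_cons]
    by_cases ht : pvStripTitle p.2 ≠ ""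
    · simp only [if_pos ht]
      rw [pv_flat_step, pv_nest_step]
      refine ih _ _ (pv_keys_nodup_insert _ _ _ hnd) ?_
      intro low
      by_cases hll : PySem.Str.lower (pvStripTitle p.2) = low
      · rw [← hll, PySem.Dict.get?_insert_self]
        have hg0 := pv_getD_group idx t2d (PySem.Str.lower (pvStripTitle p.2)) (hinv _)
        have hval := (pv_group_lookup t2d _ (pvStripTitle p.2) hnd hg0).2
        rw [hval]
        exact pv_group_insert_same t2d _ (pvStripTitle p.2) _ hnd hg0
      · rw [PySem.Dict.get?_insert_of_ne _ _ (fun h => hll h.symm),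
            pv_group_insert_other t2d _ _ _ hll]
        exact hinv low
    · simp only [if_neg ht]
      exact ih t2d idx hnd hinv

-- A writes the flat index with `setdefault` then a mutate-append; as one dict operation that is a single modify
-- setdefault-then-modify at the same key is one modify
theorem pv_sd_modify (d : PySem.Dict String (List String)) (t : String) (f : List String → List String) :
    (d.setdefault t []).modify t [] f = d.modify t [] f := by
  have hmod : ∀ (e : PySem.Dict String (List String)), e.modify t [] f = e.insert t (f (e.getD t [])) := fun _ => rfl
  rw [hmod, hmod, PySem.Dict.getD_setdefault_self]
  by_cases h : d.contains t
  · rw [PySem.Dict.setdefault_of_contains _ _ h]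
  · rw [PySem.Dict.setdefault_of_not_contains _ _ (by simpa using h),
        PySem.Dict.insert_insert_self]

-- A's flat index in pure modify form
def pvFlatIndex (corpus : List (String × List (String × String))) : PySem.Dict String (List String) :=
  corpus.foldl
    (fun d p =>
      let title := pvStripTitle p.2
      if title ≠ "" then d.modify title [] (fun xs => xs ++ [p.1]) else d)
    PySem.Dict.empty

theorem pv_flat_eq (corpus : List (String × List (String × String))) :
    pvTitleIndex corpus = pvFlatIndex corpus := by
  unfold pvTitleIndex pvFlatIndex
  congr 1
  funext d p
  by_cases h : pvStripTitle p.2 ≠ "" <;> simp only [h, pv_sd_modify]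


-- the per-context resolution: A's exact-then-scan step equals one set-update by B's resolve
theorem pv_resolve_eq (t2d : PySem.Dict String (List String)) (idx : PySem.Dict String (PySem.Dict String (List String)))
    (hnd : t2d.keys.Nodup)
    (hinv : ∀ low, (match idx.get? low with | some g => g.items | none => []) = pvGroupOf t2d.items low)
    (s : PySem.Set String) (ctx : List String) :
    (if t2d.contains (pvCtxTitle ctx) then PySem.Set.update s (t2d.getD (pvCtxTitle ctx) [])
     else
       match t2d.items.find? (fun t => PySem.Str.lower t.1 == PySem.Str.lower (pvCtxTitle ctx)) with
       | some t => PySem.Set.update s t.2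
       | none => s)
    = PySem.Set.update s (pvResolve idx ctx) := by
  rw [show pvResolve idx ctx = (match idx.get? (PySem.Str.lower (pvCtxTitle ctx)) with
      | none => []
      | some group =>
        if group.items = [] then []
        else if group.contains (pvCtxTitle ctx) then group.getD (pvCtxTitle ctx) []
        else ((group.items.head?).map (·.2)).getD []) from rfl]
  set title := pvCtxTitle ctx with htitle
  have h := hinv (PySem.Str.lower title)
  have hfind : t2d.items.find? (fun t => PySem.Str.lower t.1 == PySem.Str.lower title)
      = (pvGroupOf t2d.items (PySem.Str.lower title)).head? := by
    unfold pvGroupOf; exact List.head?_filter.symm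
  cases hg : idx.get? (PySem.Str.lower title) with
  | none =>
    rw [hg] at h
    replace h : [] = pvGroupOf t2d.items (PySem.Str.lower title) := h
    dsimp only
    have hct : t2d.contains title = false := by
      by_contra hc
      have hc' : t2d.contains title = true := Bool.not_eq_false _ |>.mp hc
      obtain ⟨v, hv⟩ : ∃ v, t2d.get? title = some v := by
        have := PySem.Dict.contains_eq_isSome_get? (d := t2d) (k := title)
        rw [hc'] at this
        exact Option.isSome_iff_exists.mp this.symm
      have : (title, v) ∈ pvGroupOf t2d.items (PySem.Str.lower title) :=
        List.mem_filter.mpr ⟨PySem.Dict.mem_items_of_get?_eq_some _ hv, by simp⟩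
      rw [← h] at this
      simp at this
    rw [if_neg (by simp [hct]), hfind, ← h]
    rfl
  | some g =>
    rw [hg] at h
    replace h : g.items = pvGroupOf t2d.items (PySem.Str.lower title) := h
    dsimp only
    obtain ⟨hcontEq, hvalEq⟩ := pv_group_lookup t2d g title hnd h
    by_cases hemp : g.items = []
    · have hgrp : pvGroupOf t2d.items (PySem.Str.lower title) = [] := by rw [← h, hemp]
      have hct : t2d.contains title = false := by
        by_contra hc
        have hc' : t2d.contains title = true := Bool.not_eq_false _ |>.mp hc
        obtain ⟨v, hv⟩ : ∃ v, t2d.get? title = some v := by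
          have := PySem.Dict.contains_eq_isSome_get? (d := t2d) (k := title)
          rw [hc'] at this
          exact Option.isSome_iff_exists.mp this.symm
        have : (title, v) ∈ pvGroupOf t2d.items (PySem.Str.lower title) :=
          List.mem_filter.mpr ⟨PySem.Dict.mem_items_of_get?_eq_some _ hv, by simp⟩
        rw [hgrp] at this
        simp at this
      rw [if_neg (by simp [hct]), hfind, hgrp, if_pos hemp]
      rfl
    · rw [if_neg hemp]
      by_cases hct : t2d.contains title
      · rw [if_pos hct, if_pos (hcontEq.trans hct), hvalEq]
      · rw [if_neg hct, if_neg (by rw [hcontEq]; exact hct), hfind, ← h]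
        cases hgi : g.items with
        | nil => exact absurd hgi hemp
        | cons q rest => rfl

-- A's inner context loop is one set-update by the flattened resolves
theorem pv_fold_eq (t2d : PySem.Dict String (List String)) (idx : PySem.Dict String (PySem.Dict String (List String)))
    (hnd : t2d.keys.Nodup)
    (hinv : ∀ low, (match idx.get? low with | some g => g.items | none => []) = pvGroupOf t2d.items low)
    (ctxs : List (List String)) (s : PySem.Set String) :
    ctxs.foldl
      (fun s ctx =>
        if t2d.contains (pvCtxTitle ctx) then PySem.Set.update s (t2d.getD (pvCtxTitle ctx) [])
        else
          match t2d.items.find? (fun t => PySem.Str.lower t.1 == PySem.Str.lower (pvCtxTitle ctx)) with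
          | some t => PySem.Set.update s t.2
          | none => s) s
    = PySem.Set.update s (ctxs.flatMap (pvResolve idx)) := by
  induction ctxs generalizing s with
  | nil => rfl
  | cons c ctxs ih =>
    rw [List.foldl_cons, pv_resolve_eq t2d idx hnd hinv s c, ih, List.flatMap_cons,
        PySem.Set.update_append]

-- ===== VERDICT (by name: the statement is the Claim_ definition above) =====
theorem get_oracle_docs_spec : Claim_equal_get_oracle_docs := by
  intro questions_map corpus _ _
  unfold Spec_get_oracle_docs get_oracle_docs get_oracle_docs_alt
  have hbase := pv_inv corpus PySem.Dict.empty PySem.Dict.empty (by simp [PySem.Dict.keys_empty])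
    (by intro low; rfl)
  rw [pv_flat_eq]
  have hnd : (pvFlatIndex corpus).keys.Nodup := hbase.1
  have hinv : ∀ low, (match (pvIndexNest corpus).get? low with | some g => g.items | none => []) = pvGroupOf (pvFlatIndex corpus).items low := hbase.2
  dsimp only
  congr 1
  refine congrFun (congrFun (congrArg _ ?_) _) _
  funext om q
  congr 1
  by_cases hc : (PySem.Dict.mk q.2).contains "context"
  · rw [if_pos hc, pv_fold_eq (pvFlatIndex corpus) (pvIndexNest corpus) hnd hinv _ PySem.Set.empty,
        PySem.Set.update_empty]
  · rw [if_neg hc, PySem.Dict.getD_of_not_contains _ [] (Bool.eq_false_iff.mpr hc)]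
    rfl
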